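-- pv_equiv track=rewrite | github.com/soundsofmath/repository.atom | omega/script.module.absolutionscrapers/lib/absolutionscrapers/modules/source_utils.py | get_qual
-- ===== SOURCE A (Python) =====
-- RES_4K = ['.4k.', '.hd4k.', '.4khd.', '.uhd.', '.ultrahd.', '.ultra.hd.', '2160', '216o']
--
-- RES_1080 = ['1080', '1o8o', '.fullhd.', '.full.hd.', '.fhd.']
--
-- RES_720 = ['.720.', '.720p.', '.720i.', '.hd720.', '.720hd.', '.72o.', '.72op.']
--
-- RES_SD = ['576', '480', '.360.', '.360p.', '.360i.', '.sd360.', '.360sd.', '.240.', '.240p.', '.240i.', '.sd240.', '.240sd.']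
--
-- SCR = ['.scr.', '.screener.', '.dvdscr.', '.dvd.scr.', '.r5.', '.r6.']
--
-- CAM = ['.camrip.', '.tsrip.', '.hdcam.', '.hd.cam.', '.cam.rip.', '.hdts.', '.dvdcam.', '.dvdts.', '.cam.', '.telesync.', '.ts.']
--
-- AVC = ['.h.264.', '.h264.', '.x264.', '.avc.']
--
-- def get_qual(term):
--     term = '.{}.'.format(term).lower()
--     if any(i in term for i in SCR):
--         return 'scr'
--     elif any(i in term for i in CAM):
--         return 'cam'
--     elif any(i in term for i in RES_4K) and not any(i in term for i in RES_1080):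
--         return '4k'
--     elif any(i in term for i in RES_1080):
--         return '1080p'
--     elif any(i in term for i in RES_720):
--         return '720p'
--     elif any(i in term for i in RES_SD):
--         return 'sd'
--     elif 'remux.' in term and any(i in term for i in AVC):
--         return '1080p'
--     elif 'remux.' in term:
--         return '4k'
--     else:
--         return 'sd'
-- ===== SOURCE B (Python) =====
-- # One flat pattern table tagged with priority ranks; a single pass collects the
-- # ranks of all matching patterns, min picks the winner, and a label table
-- # (whose remux slot depends on an AVC match) turns the rank into the answer.
--
-- RES_4K = ['.4k.', '.hd4k.', '.4khd.', '.uhd.', '.ultrahd.', '.ultra.hd.', '2160', '216o']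
-- RES_1080 = ['1080', '1o8o', '.fullhd.', '.full.hd.', '.fhd.']
-- RES_720 = ['.720.', '.720p.', '.720i.', '.hd720.', '.720hd.', '.72o.', '.72op.']
-- RES_SD = ['576', '480', '.360.', '.360p.', '.360i.', '.sd360.', '.360sd.', '.240.', '.240p.', '.240i.', '.sd240.', '.240sd.']
-- SCR = ['.scr.', '.screener.', '.dvdscr.', '.dvd.scr.', '.r5.', '.r6.']
-- CAM = ['.camrip.', '.tsrip.', '.hdcam.', '.hd.cam.', '.cam.rip.', '.hdts.', '.dvdcam.', '.dvdts.', '.cam.', '.telesync.', '.ts.']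
-- AVC = ['.h.264.', '.h264.', '.x264.', '.avc.']
--
-- # rank 0..7; 1080 ranks above 4k, which replaces A's '4k and not 1080' guard
-- PATTERNS = (
--     [(p, 0) for p in SCR]
--     + [(p, 1) for p in CAM]
--     + [(p, 2) for p in RES_1080]
--     + [(p, 3) for p in RES_4K]
--     + [(p, 4) for p in RES_720]
--     + [(p, 5) for p in RES_SD]
--     + [('remux.', 6)]
--     + [(p, 7) for p in AVC]
-- )
--
--
-- def get_qual(term):
--     term = '.{}.'.format(term).lower()
--     ranks = [k for p, k in PATTERNS if p in term]
--     best = min(ranks, default=8)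
--     labels = ['scr', 'cam', '1080p', '4k', '720p', 'sd',
--               '1080p' if 7 in ranks else '4k',  # remux: 1080p when AVC, else 4k
--               'sd', 'sd']
--     return labels[best]
-- ===== Notes on version B (the rewrite author's own statement) =====
-- stated objective: alternative
-- what changed: Replaced A's eight-branch elif cascade (with its '4k and not 1080' guard) by a single pass over one flat rank-tagged pattern table: collect the ranks of all matching patterns, take the minimum (1080 ranked above 4k), and index a label table whose remux slot is chosen by the AVC flag.
import Mathlib
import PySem

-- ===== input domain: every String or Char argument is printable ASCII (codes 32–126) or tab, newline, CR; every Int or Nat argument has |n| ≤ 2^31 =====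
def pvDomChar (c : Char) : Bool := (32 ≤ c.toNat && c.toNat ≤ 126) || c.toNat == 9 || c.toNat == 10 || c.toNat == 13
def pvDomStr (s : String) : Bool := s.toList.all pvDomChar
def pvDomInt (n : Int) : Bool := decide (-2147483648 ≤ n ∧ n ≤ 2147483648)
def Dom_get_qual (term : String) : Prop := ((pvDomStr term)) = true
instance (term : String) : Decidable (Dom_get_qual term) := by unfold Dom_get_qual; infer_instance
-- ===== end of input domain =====

-- B replaces A's elif cascade by one flat rank-tagged pattern table scanned once:
-- the minimum rank of all matching patterns indexes a label table; objective: simpler.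

-- shared module constants (the same lists both Pythons define at module level)
def RES_4K : List String := [".4k.", ".hd4k.", ".4khd.", ".uhd.", ".ultrahd.", ".ultra.hd.", "2160", "216o"]
def RES_1080 : List String := ["1080", "1o8o", ".fullhd.", ".full.hd.", ".fhd."]
def RES_720 : List String := [".720.", ".720p.", ".720i.", ".hd720.", ".720hd.", ".72o.", ".72op."]
def RES_SD : List String := ["576", "480", ".360.", ".360p.", ".360i.", ".sd360.", ".360sd.", ".240.", ".240p.", ".240i.", ".sd240.", ".240sd."]
def SCR : List String := [".scr.", ".screener.", ".dvdscr.", ".dvd.scr.", ".r5.", ".r6."]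
def CAM : List String := [".camrip.", ".tsrip.", ".hdcam.", ".hd.cam.", ".cam.rip.", ".hdts.", ".dvdcam.", ".dvdts.", ".cam.", ".telesync.", ".ts."]
def AVC : List String := [".h.264.", ".h264.", ".x264.", ".avc."]

-- any(i in term for i in pats)
def anyIn (pats : List String) (t : List Char) : Bool :=
  pats.any (fun p => PySem.Chars.isIn p.toList t)

-- ===== PORT A =====
def get_qual (term : String) : String :=
  let t := PySem.Chars.lower ('.' :: term.toList ++ ['.'])
  if anyIn SCR t then "scr"
  else if anyIn CAM t then "cam"
  else if anyIn RES_4K t && !(anyIn RES_1080 t) then "4k"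
  else if anyIn RES_1080 t then "1080p"
  else if anyIn RES_720 t then "720p"
  else if anyIn RES_SD t then "sd"
  else if PySem.Chars.isIn "remux.".toList t && anyIn AVC t then "1080p"
  else if PySem.Chars.isIn "remux.".toList t then "4k"
  else "sd"

-- ===== PORT B =====
-- PATTERNS: one flat table tagging every pattern with its priority rank 0..7
-- (1080 ranks above 4k, which replaces A's '4k and not 1080' guard)
def PATTERNS : List (String × Int) :=
  (SCR.map (fun p => (p, 0)))
  ++ (CAM.map (fun p => (p, 1)))
  ++ (RES_1080.map (fun p => (p, 2)))
  ++ (RES_4K.map (fun p => (p, 3)))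
  ++ (RES_720.map (fun p => (p, 4)))
  ++ (RES_SD.map (fun p => (p, 5)))
  ++ [("remux.", 6)]
  ++ (AVC.map (fun p => (p, 7)))

-- ranks = [k for p, k in PATTERNS if p in term]
def ranksOf (t : List Char) : List Int :=
  (PATTERNS.filter (fun pk => PySem.Chars.isIn pk.1.toList t)).map Prod.snd

def get_qual_alt (term : String) : String :=
  let t := PySem.Chars.lower ('.' :: term.toList ++ ['.'])
  let ranks := ranksOf t
  let best : Int := (PySem.List.min? ranks (fun x => x)).getD 8   -- min(ranks, default=8)
  let labels : List String :=
    ["scr", "cam", "1080p", "4k", "720p", "sd",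
     if ranks.contains 7 then "1080p" else "4k", "sd", "sd"]
  (PySem.List.pyGet? labels best).getD ""   -- best is always in [0,8], so the index is in range: exact

-- ===== PRECONDITION & SPEC =====
def Spec_get_qual (term : String) (out : String) : Prop := out = get_qual_alt term
instance (term : String) (out : String) : Decidable (Spec_get_qual term out) := by unfold Spec_get_qual; infer_instance

-- ===== CLAIM (what is proved, stated in full; the proofs are below) =====
def Claim_equal_get_qual : Prop := ∀ (term : String), Dom_get_qual term → Spec_get_qual term (get_qual term)

-- ===== LEMMAS AND PROOFS =====

-- membership in B's rank list, group by group
-- the ranks a single tagged group contributes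
def groupRanks (g : List String) (c : Int) (t : List Char) : List Int :=
  ((g.map (fun p => (p, c))).filter (fun pk => PySem.Chars.isIn pk.1.toList t)).map Prod.snd

theorem ranksOf_eq (t : List Char) :
    ranksOf t = groupRanks SCR 0 t ++ groupRanks CAM 1 t ++ groupRanks RES_1080 2 t
      ++ groupRanks RES_4K 3 t ++ groupRanks RES_720 4 t ++ groupRanks RES_SD 5 t
      ++ groupRanks ["remux."] 6 t ++ groupRanks AVC 7 t := by
  simp only [ranksOf, PATTERNS, groupRanks, List.filter_append, List.map_append,
    List.append_assoc, List.map_cons, List.map_nil]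

theorem mem_groupRanks (g : List String) (c : Int) (t : List Char) (k : Int) :
    k ∈ groupRanks g c t ↔ k = c ∧ anyIn g t = true := by
  simp only [groupRanks, anyIn, List.mem_map, List.mem_filter, List.any_eq_true]
  constructor
  · rintro ⟨⟨p, c'⟩, ⟨⟨q, hq, heq⟩, hin⟩, rfl⟩
    obtain ⟨rfl, rfl⟩ := Prod.mk.inj heq.symm
    exact ⟨rfl, p, hq, hin⟩
  · rintro ⟨rfl, q, hq, hin⟩
    exact ⟨(q, k), ⟨⟨q, hq, rfl⟩, hin⟩, rfl⟩

theorem mem_ranksOf_iff (t : List Char) (k : Int) :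
    k ∈ ranksOf t ↔
      (k = 0 ∧ anyIn SCR t = true) ∨ (k = 1 ∧ anyIn CAM t = true) ∨
      (k = 2 ∧ anyIn RES_1080 t = true) ∨ (k = 3 ∧ anyIn RES_4K t = true) ∨
      (k = 4 ∧ anyIn RES_720 t = true) ∨ (k = 5 ∧ anyIn RES_SD t = true) ∨
      (k = 6 ∧ anyIn ["remux."] t = true) ∨ (k = 7 ∧ anyIn AVC t = true) := by
  rw [ranksOf_eq]
  simp only [List.mem_append, mem_groupRanks, or_assoc]

theorem anyIn_remux (t : List Char) :
    anyIn ["remux."] t = PySem.Chars.isIn "remux.".toList t := by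
  simp [anyIn]

theorem min?_eq_some_of (l : List Int) (k : Int) (hk : k ∈ l) (hlow : ∀ j ∈ l, k ≤ j) :
    PySem.List.min? l (fun x => x) = some k := by
  cases h : PySem.List.min? l (fun x => x) with
  | none =>
    rw [PySem.List.min?_eq_none_iff] at h
    subst h; simp at hk
  | some m =>
    have hm := PySem.List.min?_mem h
    have h1 : m ≤ k := PySem.List.min?_isMin h k hk
    have h2 : k ≤ m := hlow m hm
    have : m = k := le_antisymm h1 h2
    rw [this]

-- min? (ranksOf t) = some k, from k's flag plus the falsity of all lower flags
theorem min_ranksOf (t : List Char) (k : Int)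
    (hk : k ∈ ranksOf t) (hlow : ∀ j ∈ ranksOf t, k ≤ j) :
    PySem.List.min? (ranksOf t) (fun x => x) = some k := min?_eq_some_of _ k hk hlow

-- ===== VERDICT (by name: the statement is the Claim_ definition above) =====
theorem get_qual_spec : Claim_equal_get_qual := by
  intro term _
  unfold Spec_get_qual get_qual get_qual_alt
  dsimp only
  set t := PySem.Chars.lower ('.' :: term.toList ++ ['.']) with ht
  rw [← anyIn_remux]
  by_cases h1 : anyIn SCR t = true
  · have hmin := min_ranksOf t 0 ((mem_ranksOf_iff t 0).mpr (Or.inl ⟨rfl, h1⟩)) (by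
        intro j hj; rw [mem_ranksOf_iff] at hj
        rcases hj with ⟨rfl,h⟩|⟨rfl,h⟩|⟨rfl,h⟩|⟨rfl,h⟩|⟨rfl,h⟩|⟨rfl,h⟩|⟨rfl,h⟩|⟨rfl,h⟩
        · omega
        · omega
        · omega
        · omega
        · omega
        · omega
        · omega
        · omega)
    simp only [h1, if_true, hmin, Option.getD_some]
    rfl
  · by_cases h2 : anyIn CAM t = true
    · have hmin := min_ranksOf t 1 ((mem_ranksOf_iff t 1).mpr (Or.inr (Or.inl ⟨rfl, h2⟩))) (by
        intro j hj; rw [mem_ranksOf_iff] at hj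
        rcases hj with ⟨rfl,h⟩|⟨rfl,h⟩|⟨rfl,h⟩|⟨rfl,h⟩|⟨rfl,h⟩|⟨rfl,h⟩|⟨rfl,h⟩|⟨rfl,h⟩
        · exact absurd h h1
        · omega
        · omega
        · omega
        · omega
        · omega
        · omega
        · omega)
      simp only [h1, h2, if_true, hmin, Option.getD_some]
      rfl
    · by_cases h3 : anyIn RES_1080 t = true
      · have hmin := min_ranksOf t 2 ((mem_ranksOf_iff t 2).mpr (Or.inr (Or.inr (Or.inl ⟨rfl, h3⟩)))) (by
        intro j hj; rw [mem_ranksOf_iff] at hj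
        rcases hj with ⟨rfl,h⟩|⟨rfl,h⟩|⟨rfl,h⟩|⟨rfl,h⟩|⟨rfl,h⟩|⟨rfl,h⟩|⟨rfl,h⟩|⟨rfl,h⟩
        · exact absurd h h1
        · exact absurd h h2
        · omega
        · omega
        · omega
        · omega
        · omega
        · omega)
        simp only [h1, h2, h3, Bool.not_true, Bool.and_false, hmin, Option.getD_some]
        rfl
      · by_cases h4 : anyIn RES_4K t = true
        · have hmin := min_ranksOf t 3 ((mem_ranksOf_iff t 3).mpr (Or.inr (Or.inr (Or.inr (Or.inl ⟨rfl, h4⟩))))) (by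
        intro j hj; rw [mem_ranksOf_iff] at hj
        rcases hj with ⟨rfl,h⟩|⟨rfl,h⟩|⟨rfl,h⟩|⟨rfl,h⟩|⟨rfl,h⟩|⟨rfl,h⟩|⟨rfl,h⟩|⟨rfl,h⟩
        · exact absurd h h1
        · exact absurd h h2
        · exact absurd h h3
        · omega
        · omega
        · omega
        · omega
        · omega)
          simp only [h1, h2, h3, h4, Bool.not_false, Bool.and_true, hmin, Option.getD_some]
          rfl
        · by_cases h5 : anyIn RES_720 t = true
          · have hmin := min_ranksOf t 4 ((mem_ranksOf_iff t 4).mpr (Or.inr (Or.inr (Or.inr (Or.inr (Or.inl ⟨rfl, h5⟩)))))) (by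
        intro j hj; rw [mem_ranksOf_iff] at hj
        rcases hj with ⟨rfl,h⟩|⟨rfl,h⟩|⟨rfl,h⟩|⟨rfl,h⟩|⟨rfl,h⟩|⟨rfl,h⟩|⟨rfl,h⟩|⟨rfl,h⟩
        · exact absurd h h1
        · exact absurd h h2
        · exact absurd h h3
        · exact absurd h h4
        · omega
        · omega
        · omega
        · omega)
            simp only [h1, h2, h3, h4, h5, hmin, Option.getD_some]
            rfl
          · by_cases h6 : anyIn RES_SD t = true
            · have hmin := min_ranksOf t 5 ((mem_ranksOf_iff t 5).mpr (Or.inr (Or.inr (Or.inr (Or.inr (Or.inr (Or.inl ⟨rfl, h6⟩))))))) (by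
        intro j hj; rw [mem_ranksOf_iff] at hj
        rcases hj with ⟨rfl,h⟩|⟨rfl,h⟩|⟨rfl,h⟩|⟨rfl,h⟩|⟨rfl,h⟩|⟨rfl,h⟩|⟨rfl,h⟩|⟨rfl,h⟩
        · exact absurd h h1
        · exact absurd h h2
        · exact absurd h h3
        · exact absurd h h4
        · exact absurd h h5
        · omega
        · omega
        · omega)
              simp only [h1, h2, h3, h4, h5, h6, hmin, Option.getD_some]
              rfl
            · by_cases h7 : anyIn ["remux."] t = true
              · have hmin := min_ranksOf t 6 ((mem_ranksOf_iff t 6).mpr (Or.inr (Or.inr (Or.inr (Or.inr (Or.inr (Or.inr (Or.inl ⟨rfl, h7⟩)))))))) (by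
        intro j hj; rw [mem_ranksOf_iff] at hj
        rcases hj with ⟨rfl,h⟩|⟨rfl,h⟩|⟨rfl,h⟩|⟨rfl,h⟩|⟨rfl,h⟩|⟨rfl,h⟩|⟨rfl,h⟩|⟨rfl,h⟩
        · exact absurd h h1
        · exact absurd h h2
        · exact absurd h h3
        · exact absurd h h4
        · exact absurd h h5
        · exact absurd h h6
        · omega
        · omega)
                by_cases h8 : anyIn AVC t = true
                · have hc7 : (7:Int) ∈ ranksOf t := (mem_ranksOf_iff t 7).mpr (Or.inr (Or.inr (Or.inr (Or.inr (Or.inr (Or.inr (Or.inr (⟨rfl, h8⟩))))))))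
                  simp only [h1, h2, h3, h4, h5, h6, h7, h8, Bool.and_self, hmin, Option.getD_some]
                  simp [PySem.List.pyGet?, PySem.List.pyIdx?, hc7]
                · have hc7 : (7:Int) ∉ ranksOf t := by
                    intro hcc
                    rw [mem_ranksOf_iff] at hcc
                    rcases hcc with ⟨h9,h⟩|⟨h9,h⟩|⟨h9,h⟩|⟨h9,h⟩|⟨h9,h⟩|⟨h9,h⟩|⟨h9,h⟩|⟨h9,h⟩
                    · omega
                    · omega
                    · omega
                    · omega
                    · omega
                    · omega
                    · omega
                    · exact absurd h h8
                  simp only [h1, h2, h3, h4, h5, h6, h7, h8, Bool.and_false, hmin, Option.getD_some]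
                  simp [PySem.List.pyGet?, PySem.List.pyIdx?, hc7]
              · by_cases h8 : anyIn AVC t = true
                · have hmin := min_ranksOf t 7 ((mem_ranksOf_iff t 7).mpr (Or.inr (Or.inr (Or.inr (Or.inr (Or.inr (Or.inr (Or.inr (⟨rfl, h8⟩))))))))) (by
        intro j hj; rw [mem_ranksOf_iff] at hj
        rcases hj with ⟨rfl,h⟩|⟨rfl,h⟩|⟨rfl,h⟩|⟨rfl,h⟩|⟨rfl,h⟩|⟨rfl,h⟩|⟨rfl,h⟩|⟨rfl,h⟩
        · exact absurd h h1
        · exact absurd h h2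
        · exact absurd h h3
        · exact absurd h h4
        · exact absurd h h5
        · exact absurd h h6
        · exact absurd h h7
        · omega)
                  simp only [h1, h2, h3, h4, h5, h6, h7, h8, hmin, Option.getD_some]
                  rfl
                · have hnil : ranksOf t = [] := by
                    rw [List.eq_nil_iff_forall_not_mem]
                    intro j hj
                    rw [mem_ranksOf_iff] at hj
                    rcases hj with ⟨h9,h⟩|⟨h9,h⟩|⟨h9,h⟩|⟨h9,h⟩|⟨h9,h⟩|⟨h9,h⟩|⟨h9,h⟩|⟨h9,h⟩
                    · exact absurd h h1
                    · exact absurd h h2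
                    · exact absurd h h3
                    · exact absurd h h4
                    · exact absurd h h5
                    · exact absurd h h6
                    · exact absurd h h7
                    · exact absurd h h8
                  have hmin : PySem.List.min? (ranksOf t) (fun x => x) = none := by
                    rw [PySem.List.min?_eq_none_iff]; exact hnil
                  simp only [h1, h2, h3, h4, h5, h6, h7, h8, Bool.and_self, hmin, Option.getD_none]
                  rfl
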